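-- pv_equiv track=rewrite | github.com/denysmarakhovskyi/python-progs | just_progs.py | compute_tax
-- ===== SOURCE A (Python) =====
-- def compute_tax(money_list):
--     tax = 0
--     for money in money_list:
--         if money >= 200:
--             tax += 20
--         elif money >= 100:
--             tax += 10
--         else:
--             tax += 0
--         money += tax
--     return tax
-- ===== SOURCE B (Python) =====
-- def compute_tax(money_list):
--     high = sum(1 for m in money_list if m >= 200)
--     mid = sum(1 for m in money_list if 100 <= m < 200)
--     return 20 * high + 10 * mid
-- ===== Notes on version B (the rewrite author's own statement) =====
-- stated objective: alternative
-- what changed: Replaces the per-element running tax accumulator with two bracket counts (elements >= 200 and elements in [100,200)) combined by the closed form 20*high + 10*mid.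
import Mathlib
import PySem

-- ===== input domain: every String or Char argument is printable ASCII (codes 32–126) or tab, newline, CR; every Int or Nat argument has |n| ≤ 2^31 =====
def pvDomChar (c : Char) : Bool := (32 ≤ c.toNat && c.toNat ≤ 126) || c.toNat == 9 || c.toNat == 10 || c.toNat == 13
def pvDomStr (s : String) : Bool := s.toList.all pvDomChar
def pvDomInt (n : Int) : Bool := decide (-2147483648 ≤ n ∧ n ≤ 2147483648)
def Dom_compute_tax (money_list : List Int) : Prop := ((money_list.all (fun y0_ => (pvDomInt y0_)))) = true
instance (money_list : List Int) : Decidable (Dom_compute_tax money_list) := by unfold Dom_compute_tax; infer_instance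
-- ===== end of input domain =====

-- ===== PORT A =====
-- literal port of A: fold with running tax accumulator (the 'money += tax' line is dead, kept as in source via the loop state being just tax)
def compute_tax (money_list : List Int) : Int :=
  money_list.foldl (fun tax money =>
    if money ≥ 200 then tax + 20
    else if money ≥ 100 then tax + 10
    else tax + 0) 0

-- ===== PORT B =====
-- port of B: two bracket counts, combined by closed form
def compute_tax_alt (money_list : List Int) : Int :=
  let high : Int := ((money_list.filter (fun m => m ≥ 200)).length : Int)
  let mid : Int := ((money_list.filter (fun m => 100 ≤ m ∧ m < 200)).length : Int)
  20 * high + 10 * mid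

-- ===== PRECONDITION & SPEC =====
def Spec_compute_tax (money_list : List Int) (out : Int) : Prop := out = compute_tax_alt money_list
instance (money_list : List Int) (out : Int) : Decidable (Spec_compute_tax money_list out) := by unfold Spec_compute_tax; infer_instance

-- ===== CLAIM (what is proved, stated in full; the proofs are below) =====
def Claim_equal_compute_tax : Prop := ∀ (money_list : List Int), Dom_compute_tax money_list → Spec_compute_tax money_list (compute_tax money_list)

-- ===== LEMMAS AND PROOFS =====

-- ===== VERDICT (by name: the statement is the Claim_ definition above) =====
theorem foldl_tax_shift (l : List Int) (t : Int) :
    l.foldl (fun tax money =>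
      if money ≥ 200 then tax + 20
      else if money ≥ 100 then tax + 10
      else tax + 0) t
    = t + 20 * ((l.filter (fun m => m ≥ 200)).length : Int)
        + 10 * ((l.filter (fun m => decide (100 ≤ m ∧ m < 200))).length : Int) := by
  induction l generalizing t with
  | nil => simp
  | cons x xs ih =>
    simp only [List.foldl_cons, List.filter_cons, ih]
    by_cases h1 : x ≥ 200 <;> by_cases h2 : x ≥ 100 <;> by_cases h3 : x < 200 <;>
      simp [h1, h2, h3, decide_eq_true_eq] <;> push_cast <;> omega

theorem compute_tax_spec : Claim_equal_compute_tax := by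
  intro l _
  unfold Spec_compute_tax compute_tax compute_tax_alt
  rw [foldl_tax_shift]
  simp
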